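-- pv_equiv track=rewrite | github.com/papmatedaniel/Szimulacio | tisztakod.py | egysugarukor
-- ===== SOURCE A (Python) =====
-- def egysugarukor(pozicio: tuple[int, int]) -> set:
--     """Kiszámolja a pályán belül xy pozíció mellett
--     lévő cellákat, és visszadja annak listáját"""
--     iranyok = {
--         (0, 1),
--         (0, -1),
--         (1, 0),
--         (-1, 0),
--         (1, 1),
--         (1, -1),
--         (-1, -1),
--         (-1, 1),
--     }  # Irányok
--     egysugaru_szabadkord = set()
--     x1, y1 = pozicio
--     for x2, y2 in iranyok:
--         uj_pozicio = (x1 + x2, y1 + y2)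
--         if 0 <= uj_pozicio[0] <= 19 and 0 <= uj_pozicio[1] <= 19:
--             egysugaru_szabadkord.add(uj_pozicio)
--     return egysugaru_szabadkord
-- ===== SOURCE B (Python) =====
-- def egysugarukor(pozicio: tuple[int, int]) -> set:
--     """Same result via two clamped 1-D ranges: the valid neighbour block is the
--     product of the clamped x-range and y-range minus the centre cell."""
--     x, y = pozicio
--     xs = range(max(0, x - 1), min(19, x + 1) + 1)
--     ys = range(max(0, y - 1), min(19, y + 1) + 1)
--     return {(a, b) for a in xs for b in ys if (a, b) != (x, y)}
-- ===== Notes on version B (the rewrite author's own statement) =====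
-- stated objective: simpler
-- what changed: Replaces the 8-direction offset table with a per-cell bound check by the product of two clamped 1-D coordinate ranges minus the centre cell, so range limits enforce grid validity.
import Mathlib
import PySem

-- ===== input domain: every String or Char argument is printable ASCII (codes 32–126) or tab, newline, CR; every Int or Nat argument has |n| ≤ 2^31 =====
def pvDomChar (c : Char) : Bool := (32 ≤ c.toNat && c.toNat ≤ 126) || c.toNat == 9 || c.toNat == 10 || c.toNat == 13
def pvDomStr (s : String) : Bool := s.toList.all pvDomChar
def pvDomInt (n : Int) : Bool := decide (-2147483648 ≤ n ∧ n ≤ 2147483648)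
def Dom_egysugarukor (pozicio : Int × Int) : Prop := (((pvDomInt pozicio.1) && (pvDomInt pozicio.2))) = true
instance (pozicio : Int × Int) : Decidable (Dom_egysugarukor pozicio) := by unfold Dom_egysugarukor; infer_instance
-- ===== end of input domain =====

-- B replaces A's 8-direction offset table with per-cell bound checks by the product of two
-- clamped 1-D coordinate ranges minus the centre cell (objective: simpler).
-- Both Pythons return a set; its elements are held here as a duplicate-free list, and since
-- Python's set iteration order is not modelled, both ports emit the elements in row-major order.

-- ===== PORT A =====
-- the literal 'iranyok' set of 8 direction offsets (order of emission: row-major, see above)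
def pvDirs : List (Int × Int) :=
  [(-1, -1), (-1, 0), (-1, 1), (0, -1), (0, 1), (1, -1), (1, 0), (1, 1)]

def egysugarukor (pozicio : Int × Int) : List (Int × Int) :=
  pvDirs.foldl
    (fun s d =>
      if 0 ≤ pozicio.1 + d.1 ∧ pozicio.1 + d.1 ≤ 19 ∧ 0 ≤ pozicio.2 + d.2 ∧ pozicio.2 + d.2 ≤ 19
      then PySem.Set.add s (pozicio.1 + d.1, pozicio.2 + d.2) else s)
    PySem.Set.empty

-- ===== PORT B =====
def egysugarukor_alt (pozicio : Int × Int) : List (Int × Int) :=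
  let x := pozicio.1
  let y := pozicio.2
  let xs := PySem.List.pyRange (max 0 (x - 1)) (min 19 (x + 1) + 1) 1
  let ys := PySem.List.pyRange (max 0 (y - 1)) (min 19 (y + 1) + 1) 1
  PySem.Set.ofList
    (xs.flatMap (fun a => (ys.filter (fun b => !((a, b) == (x, y)))).map (fun b => (a, b))))

-- ===== PRECONDITION & SPEC =====
def Spec_egysugarukor (pozicio : Int × Int) (out : List (Int × Int)) : Prop := out = egysugarukor_alt pozicio
instance (pozicio : Int × Int) (out : List (Int × Int)) : Decidable (Spec_egysugarukor pozicio out) := by unfold Spec_egysugarukor; infer_instance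

-- ===== CLAIM (what is proved, stated in full; the proofs are below) =====
def Claim_equal_egysugarukor : Prop := ∀ (pozicio : Int × Int), Dom_egysugarukor pozicio → Spec_egysugarukor pozicio (egysugarukor pozicio)

-- ===== LEMMAS AND PROOFS =====

-- strict lexicographic order on pairs
def pvLex (p q : Int × Int) : Prop := p.1 < q.1 ∨ (p.1 = q.1 ∧ p.2 < q.2)

-- A's result as a plain filter of the 8 shifted candidates
def pvAList (x y : Int) : List (Int × Int) :=
  (pvDirs.map (fun d => (x + d.1, y + d.2))).filter
    (fun p => decide (0 ≤ p.1 ∧ p.1 ≤ 19 ∧ 0 ≤ p.2 ∧ p.2 ≤ 19))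

-- B's result before deduplication
def pvBList (x y : Int) : List (Int × Int) :=
  (PySem.List.pyRange (max 0 (x - 1)) (min 19 (x + 1) + 1) 1).flatMap
    (fun a => ((PySem.List.pyRange (max 0 (y - 1)) (min 19 (y + 1) + 1) 1).filter
        (fun b => !((a, b) == (x, y)))).map (fun b => (a, b)))

theorem pvAList_nodup (x y : Int) : (pvAList x y).Nodup := by
  apply List.Nodup.filter
  simp [pvDirs, List.nodup_cons, Prod.ext_iff]

theorem pvBList_pairwise (x y : Int) : (pvBList x y).Pairwise pvLex := by
  unfold pvBList
  rw [List.pairwise_flatMap]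
  constructor
  · intro a _
    exact List.Pairwise.map (R := fun b c : Int => b < c) (S := pvLex) _
      (fun b c h => Or.inr ⟨rfl, h⟩) ((PySem.List.pairwise_lt_pyRange_one _ _).filter _)
  · apply (PySem.List.pairwise_lt_pyRange_one _ _).imp
    intro a b hab p hp q hq
    simp only [List.mem_map] at hp hq
    obtain ⟨_, _, rfl⟩ := hp
    obtain ⟨_, _, rfl⟩ := hq
    exact Or.inl hab

theorem pvBList_nodup (x y : Int) : (pvBList x y).Nodup := by
  apply (pvBList_pairwise x y).imp
  intro p q h
  rcases h with h | ⟨_, h⟩ <;> intro e <;> rw [e] at h <;> omega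

theorem pvAList_pairwise (x y : Int) : (pvAList x y).Pairwise pvLex := by
  apply List.Pairwise.filter
  simp [pvDirs, List.pairwise_cons, pvLex]

theorem pvMem (x y : Int) (p : Int × Int) : p ∈ pvAList x y ↔ p ∈ pvBList x y := by
  obtain ⟨u, v⟩ := p
  simp only [pvAList, pvBList, pvDirs, List.mem_filter, List.mem_map, List.mem_flatMap,
    List.mem_cons, List.not_mem_nil, PySem.List.mem_pyRange_one, Prod.mk.injEq,
    Bool.not_eq_eq_eq_not, Bool.not_true, beq_eq_false_iff_ne, ne_eq, decide_eq_true_eq,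
    or_false]
  constructor
  · rintro ⟨⟨d, hd, h1, h2⟩, hb⟩
    rcases hd with rfl|rfl|rfl|rfl|rfl|rfl|rfl|rfl <;>
      (simp only [] at h1 h2;
       exact ⟨u, ⟨by omega, by omega⟩, v, ⟨⟨by omega, by omega⟩, by omega⟩, rfl, rfl⟩)
  · rintro ⟨a, ⟨ha1, ha2⟩, b, ⟨⟨hb1, hb2⟩, hne⟩, rfl, rfl⟩
    constructor
    · by_cases h1 : a = x - 1
      · by_cases h2 : b = y - 1
        · exact ⟨(-1, -1), by simp, by omega, by omega⟩
        · by_cases h3 : b = y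
          · exact ⟨(-1, 0), by simp, by omega, by omega⟩
          · exact ⟨(-1, 1), by simp, by omega, by omega⟩
      · by_cases h1' : a = x
        · by_cases h2 : b = y - 1
          · exact ⟨(0, -1), by simp, by omega, by omega⟩
          · exact ⟨(0, 1), by simp, by omega, by omega⟩
        · by_cases h2 : b = y - 1
          · exact ⟨(1, -1), by simp, by omega, by omega⟩
          · by_cases h3 : b = y
            · exact ⟨(1, 0), by simp, by omega, by omega⟩
            · exact ⟨(1, 1), by simp, by omega, by omega⟩
    · omega

theorem pvLists_eq (x y : Int) : pvAList x y = pvBList x y := by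
  apply List.eq_of_perm_of_sorted (le := pvLex)
  · intro a b _ _ h1 h2
    exfalso
    rcases h1 with h|⟨e,h⟩ <;> rcases h2 with h'|⟨e',h'⟩ <;> omega
  · exact pvAList_pairwise x y
  · exact pvBList_pairwise x y
  · exact (List.perm_ext_iff_of_nodup (pvAList_nodup x y) (pvBList_nodup x y)).2 (pvMem x y)

theorem pvA_eq (x y : Int) : egysugarukor (x, y) = pvAList x y := by
  unfold egysugarukor
  rw [show (PySem.Set.empty : List (Int × Int)) = ([] : PySem.Set (Int × Int)) from rfl]
  rw [PySem.List.foldl_ite_eq_foldl_filter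
    (fun d : Int × Int => 0 ≤ x + d.1 ∧ x + d.1 ≤ 19 ∧ 0 ≤ y + d.2 ∧ y + d.2 ≤ 19)
    (fun s d => PySem.Set.add s (x + d.1, y + d.2))]
  rw [← PySem.Set.update_map_eq_foldl_add, PySem.Set.update_nil_left]
  have h : pvAList x y = (pvDirs.filter
      (fun d => decide (0 ≤ x + d.1 ∧ x + d.1 ≤ 19 ∧ 0 ≤ y + d.2 ∧ y + d.2 ≤ 19))).map
      (fun d => (x + d.1, y + d.2)) := by
    simp only [pvAList, List.filter_map]
    rfl
  rw [← h]
  exact PySem.Set.ofList_eq_self_of_nodup _ (pvAList_nodup x y)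

theorem pvB_eq (x y : Int) : egysugarukor_alt (x, y) = pvBList x y := by
  unfold egysugarukor_alt
  exact PySem.Set.ofList_eq_self_of_nodup _ (pvBList_nodup x y)

-- ===== VERDICT (by name: the statement is the Claim_ definition above) =====
theorem egysugarukor_spec : Claim_equal_egysugarukor := by
  intro pozicio _
  obtain ⟨x, y⟩ := pozicio
  show egysugarukor (x, y) = egysugarukor_alt (x, y)
  rw [pvA_eq, pvB_eq, pvLists_eq]
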